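-- pv_equiv track=rewrite | github.com/oigomezz/Retos | Hackerearth/Algorithms/Searching/Binary-Search/Remainder-Twist/solution.py | f
-- ===== SOURCE A (Python) =====
-- def f(y, n):
--     ans = 0
--     for i in range(1, n+1):
--         if i > y:
--             ans += i-y
--             ans += (n//i-1)*(i-y)
--             if n % i == 0 and n > i:
--                 ans += i-y
--             else:
--                 ans += n % i-y+1 if n % i-y+1 >= 0 else 0
--     return ans
-- ===== SOURCE B (Python) =====
-- def f(y, n):
--     # Divisor-block summation: n//j is constant on O(sqrt(n)) blocks; each
--     # block's contribution is computed in closed form.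
--     ans = 0
--     i = max(1, y + 1)
--     c = n - y + 1
--     while i <= n:
--         q = n // i
--         hi = n // q                      # last j with n//j == q
--         cnt = hi - i + 1
--         tri = (i + hi) * cnt // 2        # sum of j for j in [i, hi]
--         ans += q * (tri - cnt * y)       # q*(j-y) summed over the block
--         m = min(hi, c // q)              # j <= m  <=>  n - q*j - y + 1 >= 0
--         if m >= i:                       # sum of (n - q*j - y + 1) over [i, m]
--             cnt2 = m - i + 1
--             ans += cnt2 * c - q * ((i + m) * cnt2 // 2)
--         if q * hi == n and hi < n:       # proper divisor: its extra is hi-y,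
--             if hi <= m:                  # not the linear remainder term
--                 ans -= c - q * hi
--             ans += hi - y
--         i = hi + 1
--     return ans
-- ===== Notes on version B (the rewrite author's own statement) =====
-- stated objective: faster
-- what changed: Replaced A's per-index O(n) loop (one remainder/quotient contribution per i) by a divisor-block sweep: n//j is constant on O(sqrt(n)) blocks, and each block's contribution (including the clipped remainder terms and the single proper-divisor correction) is computed in closed form with triangular-number sums.
import Mathlib
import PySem

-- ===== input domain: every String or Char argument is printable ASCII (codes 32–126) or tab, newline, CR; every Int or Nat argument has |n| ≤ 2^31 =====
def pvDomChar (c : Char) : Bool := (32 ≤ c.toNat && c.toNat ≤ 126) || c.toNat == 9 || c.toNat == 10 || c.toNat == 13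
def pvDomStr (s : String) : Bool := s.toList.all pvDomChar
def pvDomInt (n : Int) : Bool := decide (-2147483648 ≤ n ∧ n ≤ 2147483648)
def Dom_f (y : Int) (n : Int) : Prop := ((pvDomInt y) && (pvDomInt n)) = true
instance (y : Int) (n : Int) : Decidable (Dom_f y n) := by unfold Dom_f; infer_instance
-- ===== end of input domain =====

-- B replaces A's O(n) per-index loop by an O(√n) divisor-block sweep with closed-form block sums (faster, asymptotic).

-- ===== PORT A =====
-- loop body of A (the three `ans +=` of one iteration)
def stepA (y n : Int) (ans i : Int) : Int :=
  if i > y then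
    let ans1 := ans + (i - y)
    let ans2 := ans1 + (PySem.Int.floordiv n i - 1) * (i - y)
    if PySem.Int.mod n i = 0 ∧ n > i then ans2 + (i - y)
    else ans2 + (if PySem.Int.mod n i - y + 1 ≥ 0 then PySem.Int.mod n i - y + 1 else 0)
  else ans

def f (y : Int) (n : Int) : Int :=
  (PySem.List.pyRange 1 (n + 1) 1).foldl (stepA y n) 0

-- ===== PORT B =====
-- while-loop of Source B; `max (hi+1) (i+1)` is only a termination guard: on reachable
-- states 1 ≤ i ≤ n and then hi ≥ i (proved below), so it equals hi + 1.
def fAltLoop (y n c : Int) (ans i : Int) : Int :=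
  if _h : i ≤ n then
    let q := PySem.Int.floordiv n i
    let hi := PySem.Int.floordiv n q
    let cnt := hi - i + 1
    let tri := PySem.Int.floordiv ((i + hi) * cnt) 2
    let ans1 := ans + q * (tri - cnt * y)
    let m := min hi (PySem.Int.floordiv c q)
    let ans2 := if m ≥ i then
        ans1 + ((m - i + 1) * c - q * PySem.Int.floordiv ((i + m) * (m - i + 1)) 2)
      else ans1
    let ans3 := if q * hi = n ∧ hi < n then
        (if hi ≤ m then ans2 - (c - q * hi) else ans2) + (hi - y)
      else ans2
    fAltLoop y n c ans3 (max (hi + 1) (i + 1))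
  else ans
termination_by (n + 1 - i).toNat
decreasing_by
  have := le_max_right (PySem.Int.floordiv n (PySem.Int.floordiv n i) + 1) (i + 1)
  omega

def f_alt (y : Int) (n : Int) : Int :=
  fAltLoop y n (n - y + 1) 0 (max 1 (y + 1))

-- ===== PRECONDITION & SPEC =====
def Spec_f (y : Int) (n : Int) (out : Int) : Prop := out = f_alt y n
instance (y : Int) (n : Int) (out : Int) : Decidable (Spec_f y n out) := by unfold Spec_f; infer_instance

-- ===== CLAIM (what is proved, stated in full; the proofs are below) =====
def Claim_equal_f : Prop := ∀ (y : Int) (n : Int), Dom_f y n → Spec_f y n (f y n)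

-- ===== LEMMAS AND PROOFS =====

-- sum of g over the integer interval [lo, hi]
def S (g : Int → Int) (lo hi : Int) : Int :=
  if lo ≤ hi then S g lo (hi - 1) + g hi else 0
termination_by (hi + 1 - lo).toNat
decreasing_by omega

theorem S_nil (g : Int → Int) {lo hi : Int} (h : hi < lo) : S g lo hi = 0 := by
  rw [S]; simp [not_le.mpr h]

theorem S_succ_right (g : Int → Int) {lo hi : Int} (h : lo ≤ hi) :
    S g lo hi = S g lo (hi - 1) + g hi := by
  rw [S]; simp [h]

theorem S_congr {g g' : Int → Int} {lo hi : Int}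
    (h : ∀ j, lo ≤ j → j ≤ hi → g j = g' j) : S g lo hi = S g' lo hi := by
  by_cases hle : lo ≤ hi
  · rw [S_succ_right g hle, S_succ_right g' hle, h hi hle le_rfl,
      S_congr (fun j hj1 hj2 => h j hj1 (by omega))]
  · rw [S_nil g (by omega), S_nil g' (by omega)]
termination_by (hi + 1 - lo).toNat
decreasing_by omega

theorem S_zero (lo hi : Int) : S (fun _ => (0 : Int)) lo hi = 0 := by
  by_cases hle : lo ≤ hi
  · rw [S_succ_right _ hle, S_zero lo (hi - 1)]
    ring
  · exact S_nil _ (by omega)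
termination_by (hi + 1 - lo).toNat
decreasing_by omega

theorem S_add (g h : Int → Int) (lo hi : Int) :
    S (fun j => g j + h j) lo hi = S g lo hi + S h lo hi := by
  by_cases hle : lo ≤ hi
  · rw [S_succ_right _ hle, S_succ_right g hle, S_succ_right h hle, S_add g h lo (hi - 1)]
    ring
  · rw [S_nil _ (by omega), S_nil g (by omega), S_nil h (by omega)]
    ring
termination_by (hi + 1 - lo).toNat
decreasing_by omega

theorem S_split (g : Int → Int) {lo mid hi : Int} (h1 : lo ≤ mid + 1) (h2 : mid ≤ hi) :
    S g lo hi = S g lo mid + S g (mid + 1) hi := by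
  by_cases heq : mid = hi
  · subst heq
    rw [S_nil g (show mid < mid + 1 by omega)]
    ring
  · have hmh : mid + 1 ≤ hi := by omega
    rw [S_succ_right g (show lo ≤ hi by omega), S_succ_right g hmh,
      S_split g h1 (show mid ≤ hi - 1 by omega)]
    ring
termination_by (hi - mid).toNat
decreasing_by omega

theorem two_mul_S_id {lo hi : Int} (h : lo ≤ hi + 1) :
    2 * S (fun j => j) lo hi = (lo + hi) * (hi - lo + 1) := by
  by_cases hle : lo ≤ hi
  · rw [S_succ_right _ hle, mul_add, two_mul_S_id (show lo ≤ (hi - 1) + 1 by omega)]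
    ring
  · rw [S_nil (fun j => j) (by omega)]
    have : hi - lo + 1 = 0 := by omega
    rw [this]
    ring
termination_by (hi + 1 - lo).toNat
decreasing_by omega

theorem S_affine (p r : Int) {lo hi : Int} (h : lo ≤ hi + 1) :
    S (fun j => p * j + r) lo hi = p * S (fun j => j) lo hi + (hi - lo + 1) * r := by
  by_cases hle : lo ≤ hi
  · rw [S_succ_right _ hle, S_succ_right (fun j => j) hle,
      S_affine p r (show lo ≤ (hi - 1) + 1 by omega)]
    ring
  · rw [S_nil _ (by omega), S_nil (fun j => j) (by omega)]
    have : hi - lo + 1 = 0 := by omega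
    rw [this]
    ring
termination_by (hi + 1 - lo).toNat
decreasing_by omega

-- A's per-index contribution
def gA (y n j : Int) : Int :=
  if j > y then
    (j - y) + (PySem.Int.floordiv n j - 1) * (j - y) +
      (if PySem.Int.mod n j = 0 ∧ n > j then j - y
       else if PySem.Int.mod n j - y + 1 ≥ 0 then PySem.Int.mod n j - y + 1 else 0)
  else 0

theorem stepA_eq (y n : Int) : stepA y n = fun ans i => ans + gA y n i := by
  funext a i
  simp only [stepA, gA]
  split_ifs <;> ring

theorem sum_map_pyRange_eq_S (g : Int → Int) (a b : Int) :
    ((PySem.List.pyRange a (b + 1) 1).map g).sum = S g a b := by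
  by_cases h : a ≤ b
  · have hb : b - 1 + 1 = b := by omega
    rw [PySem.List.pyRange_one_succ_right h, List.map_append, List.sum_append,
      S_succ_right g h, ← hb, sum_map_pyRange_eq_S g a (b - 1)]
    simp
  · rw [PySem.List.pyRange_one_eq_nil (by omega), S_nil g (by omega)]
    rfl
termination_by (b + 1 - a).toNat
decreasing_by omega

theorem f_eq_S (y n : Int) : f y n = S (gA y n) 1 n := by
  unfold f
  rw [stepA_eq, PySem.List.foldl_add, sum_map_pyRange_eq_S, zero_add]

theorem gA_of_le (y n j : Int) (h : j ≤ y) : gA y n j = 0 := by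
  simp [gA, not_lt.mpr h]

theorem S_one_eq_S_lo (y n : Int) : S (gA y n) 1 n = S (gA y n) (max 1 (y + 1)) n := by
  by_cases hy : y < 1
  · have : max 1 (y + 1) = 1 := by omega
    rw [this]
  · have hmax : max 1 (y + 1) = y + 1 := by omega
    rw [hmax]
    by_cases hn : y ≤ n
    · rw [S_split (gA y n) (show (1:Int) ≤ y + 1 by omega) hn,
        S_congr (g' := fun _ => 0) (fun j hj1 hj2 => gA_of_le y n j hj2), S_zero, zero_add]
    · rw [S_nil (gA y n) (show n < y + 1 by omega),
        S_congr (g' := fun _ => 0) (fun j hj1 hj2 => gA_of_le y n j (by omega)), S_zero]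

-- extra term of one iteration, in block form (q = n//j on the block, so n%j = n - q*j)
def eFun (y n q : Int) (j : Int) : Int :=
  if n - q * j = 0 ∧ n > j then j - y
  else if n - q * j - y + 1 ≥ 0 then n - q * j - y + 1 else 0

-- its linear-remainder branch alone
def lFun (y n q : Int) (j : Int) : Int :=
  if n - q * j - y + 1 ≥ 0 then n - q * j - y + 1 else 0

theorem S_l (y n q i hi c m : Int) (hq : 0 < q) (hc : c = n - y + 1)
    (hm : m = min hi (PySem.Int.floordiv c q)) :
    S (lFun y n q) i hi = if m ≥ i then (m - i + 1) * c - q * S (fun j => j) i m else 0 := by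
  have hkey : ∀ j : Int, j ≤ hi → (j ≤ m ↔ q * j ≤ c) := by
    intro j hj
    constructor
    · intro hjm
      have h1 : j ≤ PySem.Int.floordiv c q := by omega
      have := (PySem.Int.le_floordiv_iff_mul_le hq).mp h1
      linarith [this]
    · intro hqc
      have : j ≤ PySem.Int.floordiv c q := (PySem.Int.le_floordiv_iff_mul_le hq).mpr (by linarith)
      omega
  have hmhi : m ≤ hi := by omega
  by_cases him : m ≥ i
  · rw [if_pos him]
    rw [S_split (lFun y n q) (show i ≤ m + 1 by omega) hmhi]
    have h1 : S (lFun y n q) i m = S (fun j => (-q) * j + c) i m := by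
      refine S_congr (fun j hj1 hj2 => ?_)
      have hqc : q * j ≤ c := (hkey j (by omega)).mp hj2
      simp only [lFun]
      rw [if_pos (by linarith)]
      subst hc; ring
    have h2 : S (lFun y n q) (m + 1) hi = 0 := by
      rw [S_congr (g' := fun _ => 0) (fun j hj1 hj2 => ?_), S_zero]
      have : ¬ q * j ≤ c := fun hcon => by
        have := (hkey j hj2).mpr hcon; omega
      simp only [lFun]
      rw [if_neg (by omega)]
    rw [h1, h2, S_affine (-q) c (show i ≤ m + 1 by omega)]
    ring
  · rw [if_neg him]
    rw [S_congr (g' := fun _ => 0) (fun j hj1 hj2 => ?_), S_zero]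
    have : ¬ q * j ≤ c := fun hcon => by
      have := (hkey j hj2).mpr hcon; omega
    simp only [lFun]
    rw [if_neg (by omega)]

theorem S_e (y n q i hi : Int) (hih : i ≤ hi)
    (huniq : ∀ j, i ≤ j → j ≤ hi → q * j = n → j = hi) :
    S (eFun y n q) i hi = S (lFun y n q) i hi +
      (if q * hi = n ∧ hi < n then (hi - y) - lFun y n q hi else 0) := by
  by_cases hdiv : q * hi = n ∧ hi < n
  · rw [if_pos hdiv]
    have hehi : eFun y n q hi = hi - y := by
      simp only [eFun]
      rw [if_pos ⟨by omega, by omega⟩]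
    have heq : S (eFun y n q) i (hi - 1) = S (lFun y n q) i (hi - 1) := by
      refine S_congr (fun j hj1 hj2 => ?_)
      have hne : ¬ (n - q * j = 0 ∧ n > j) := by
        rintro ⟨h0, -⟩
        have := huniq j hj1 (by omega) (by omega)
        omega
      simp only [eFun, lFun]
      rw [if_neg hne]
    rw [S_succ_right (eFun y n q) hih, S_succ_right (lFun y n q) hih, hehi, heq]
    ring
  · rw [if_neg hdiv]
    refine S_congr (fun j hj1 hj2 => ?_) |>.trans (by ring)
    have hne : ¬ (n - q * j = 0 ∧ n > j) := by
      rintro ⟨h0, hnj⟩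
      have hj : j = hi := huniq j hj1 hj2 (by omega)
      subst hj
      exact hdiv ⟨by omega, by omega⟩
    simp only [eFun, lFun]
    rw [if_neg hne]

theorem loop_eq (y n : Int) : ∀ i ans : Int, 1 ≤ i → y < i →
    fAltLoop y n (n - y + 1) ans i = ans + S (gA y n) i n := by
  intro i ans h1 hyi
  by_cases hin : i ≤ n
  · -- names and facts for the block [i, hi]
    have hi0 : 0 < i := by omega
    set q := PySem.Int.floordiv n i with hqdef
    have hq : 0 < q := by
      have := (PySem.Int.le_floordiv_iff_mul_le (a := n) hi0).mpr (by omega : 1 * i ≤ n)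
      omega
    have hqi : q * i ≤ n := by
      have h := PySem.Int.floordiv_mul_add_mod n i
      have := PySem.Int.mod_nonneg n hi0
      rw [← hqdef] at h
      nlinarith [h]
    set hi := PySem.Int.floordiv n q with hhidef
    have hih : i ≤ hi := by
      exact (PySem.Int.le_floordiv_iff_mul_le hq).mpr (by linarith)
    have hin' : hi ≤ n := by
      have hlt : n < (n + 1) * q := by nlinarith
      have := (PySem.Int.floordiv_lt_iff_lt_mul (a := n) (q := n + 1) hq).mpr hlt
      omega
    have hqhi : q * hi ≤ n := by
      have h := PySem.Int.floordiv_mul_add_mod n q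
      have := PySem.Int.mod_nonneg n hq
      rw [← hhidef] at h
      nlinarith [h]
    have hni : n < (q + 1) * i := by
      have := (PySem.Int.floordiv_eq_iff_of_pos hi0).mp hqdef.symm
      exact this.2
    have hfd : ∀ j, i ≤ j → j ≤ hi → PySem.Int.floordiv n j = q := by
      intro j hj1 hj2
      refine (PySem.Int.floordiv_eq_iff_of_pos (by omega)).mpr ⟨?_, ?_⟩
      · have : j * q ≤ n := (PySem.Int.le_floordiv_iff_mul_le hq).mp (by omega)
        linarith
      · nlinarith
    have hmod : ∀ j, i ≤ j → j ≤ hi → PySem.Int.mod n j = n - q * j := by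
      intro j hj1 hj2
      have h := PySem.Int.floordiv_mul_add_mod n j
      rw [hfd j hj1 hj2] at h
      linarith
    have huniq : ∀ j, i ≤ j → j ≤ hi → q * j = n → j = hi := by
      intro j hj1 hj2 hqj
      have : PySem.Int.floordiv n q = j := by
        refine (PySem.Int.floordiv_eq_iff_of_pos hq).mpr ⟨by nlinarith, by nlinarith⟩
      omega
    set c := n - y + 1 with hcdef
    set m := min hi (PySem.Int.floordiv c q) with hmdef
    -- closed forms for the two triangular sums
    have htri : PySem.Int.floordiv ((i + hi) * (hi - i + 1)) 2 = S (fun j => j) i hi := by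
      have h2S := two_mul_S_id (show i ≤ hi + 1 by omega)
      set SID := S (fun j => j) i hi with hSID
      set P := (i + hi) * (hi - i + 1) with hP
      exact (PySem.Int.floordiv_eq_iff_of_pos (by omega)).mpr ⟨by omega, by omega⟩
    have htri2 : m ≥ i → PySem.Int.floordiv ((i + m) * (m - i + 1)) 2 = S (fun j => j) i m := by
      intro him
      have h2S := two_mul_S_id (show i ≤ m + 1 by omega)
      set SID := S (fun j => j) i m with hSID
      set P := (i + m) * (m - i + 1) with hP
      exact (PySem.Int.floordiv_eq_iff_of_pos (by omega)).mpr ⟨by omega, by omega⟩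
    -- the block sum
    have hblock : S (gA y n) i hi =
        q * S (fun j => j) i hi + (hi - i + 1) * (-(q * y)) +
          (S (lFun y n q) i hi +
            (if q * hi = n ∧ hi < n then (hi - y) - lFun y n q hi else 0)) := by
      have hcongr : S (gA y n) i hi =
          S (fun j => (q * j + -(q * y)) + eFun y n q j) i hi := by
        refine S_congr (fun j hj1 hj2 => ?_)
        have hjy : j > y := by omega
        have heq1 : PySem.Int.floordiv n j = q := hfd j hj1 hj2
        have heq2 : PySem.Int.mod n j = n - q * j := hmod j hj1 hj2
        simp only [gA, eFun]
        rw [if_pos hjy, heq1, heq2]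
        have hlin : (j - y) + (q - 1) * (j - y) = q * j + -(q * y) := by ring
        by_cases hcond : n - q * j = 0 ∧ n > j
        · rw [if_pos hcond]
          linarith [hlin]
        · rw [if_neg hcond]
          by_cases hcond2 : n - q * j - y + 1 ≥ 0
          · rw [if_pos hcond2]
            linarith [hlin]
          · rw [if_neg hcond2]
            linarith [hlin]
      rw [hcongr, S_add (fun j => q * j + -(q * y)) (eFun y n q),
        S_affine q (-(q * y)) (show i ≤ hi + 1 by omega),
        S_e y n q i hi hih huniq]
    -- unfold one loop iteration
    rw [fAltLoop]
    rw [dif_pos hin]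
    simp only [← hqdef, ← hhidef, ← hmdef]
    have hmax : max (hi + 1) (i + 1) = hi + 1 := by omega
    rw [hmax, loop_eq y n (hi + 1) _ (by omega) (by omega),
      S_split (gA y n) (show i ≤ hi + 1 by omega) hin', hblock,
      S_l y n q i hi c m hq hcdef hmdef, htri]
    have hlhi : lFun y n q hi = if hi ≤ m then c - q * hi else 0 := by
      have hqc : q * hi ≤ c ↔ hi ≤ m := by
        constructor
        · intro h
          have : hi ≤ PySem.Int.floordiv c q :=
            (PySem.Int.le_floordiv_iff_mul_le hq).mpr (by linarith)
          omega
        · intro h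
          have : hi ≤ PySem.Int.floordiv c q := by omega
          have := (PySem.Int.le_floordiv_iff_mul_le hq).mp this
          linarith
      simp only [lFun]
      by_cases hhm : hi ≤ m
      · rw [if_pos (by omega : n - q * hi - y + 1 ≥ 0), if_pos hhm]
        omega
      · rw [if_neg (by omega : ¬ n - q * hi - y + 1 ≥ 0), if_neg hhm]
    rw [hlhi]
    by_cases hd : q * hi = n ∧ hi < n
    · rw [if_pos hd, if_pos hd]
      by_cases hhm : hi ≤ m
      · rw [if_pos hhm, if_pos hhm]
        by_cases him : m ≥ i
        · rw [if_pos him, if_pos him, htri2 him]; ring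
        · rw [if_neg him, if_neg him]; ring
      · rw [if_neg hhm, if_neg hhm]
        by_cases him : m ≥ i
        · rw [if_pos him, if_pos him, htri2 him]; ring
        · rw [if_neg him, if_neg him]; ring
    · rw [if_neg hd, if_neg hd]
      by_cases him : m ≥ i
      · rw [if_pos him, if_pos him, htri2 him]; ring
      · rw [if_neg him, if_neg him]; ring
  · rw [fAltLoop, dif_neg hin, S_nil (gA y n) (by omega)]
    ring
termination_by i => (n + 1 - i).toNat
decreasing_by
  have hx : i ≤ PySem.Int.floordiv n (PySem.Int.floordiv n i) := hih
  omega

-- ===== VERDICT (by name: the statement is the Claim_ definition above) =====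
theorem f_spec : Claim_equal_f := by
  intro y n _
  unfold Spec_f f_alt
  rw [loop_eq y n (max 1 (y + 1)) 0 (le_max_left _ _) (by omega), zero_add,
    ← S_one_eq_S_lo, ← f_eq_S]
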